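-- pv_equiv track=rewrite | github.com/syaofox/fastpic | utils/folder_tree.py | compute_folder_counts
-- ===== SOURCE A (Python) =====
-- def compute_folder_counts(rel_paths: list[str]) -> dict[str, int]:
--     """从 relative_path 列表计算每个文件夹下的图片总数（含子目录）。"""
--     counts: dict[str, int] = {"": len(rel_paths)}
--     for rp in rel_paths:
--         parts = rp.split("/")
--         for i in range(1, len(parts)):
--             prefix = "/".join(parts[:i])
--             counts[prefix] = counts.get(prefix, 0) + 1
--     return counts
-- ===== SOURCE B (Python) =====
-- def compute_folder_counts(rel_paths: list[str]) -> dict[str, int]: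
--     """从 relative_path 列表计算每个文件夹下的图片总数（含子目录）。"""
--     # Phase 1: collect every folder prefix, building each one incrementally
--     # (no repeated slicing/joining).
--     prefixes = []
--     for rp in rel_paths:
--         acc = None
--         for comp in rp.split("/")[:-1]:
--             acc = comp if acc is None else acc + "/" + comp
--             prefixes.append(acc)
--     # Phase 2: one counting pass over the flat prefix stream.
--     counts = {"": len(rel_paths)}
--     for p in prefixes:
--         counts[p] = counts.get(p, 0) + 1
--     return counts
-- ===== Notes on version B (the rewrite author's own statement) =====
-- stated objective: alternative
-- what changed: B builds each folder prefix by incremental string concatenation and splits the work into two phases (collect all prefixes into a flat list, then one counting pass over it), instead of A's nested loop that re-slices and re-joins parts[:i] at every depth of every path while counting in place.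
import Mathlib
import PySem

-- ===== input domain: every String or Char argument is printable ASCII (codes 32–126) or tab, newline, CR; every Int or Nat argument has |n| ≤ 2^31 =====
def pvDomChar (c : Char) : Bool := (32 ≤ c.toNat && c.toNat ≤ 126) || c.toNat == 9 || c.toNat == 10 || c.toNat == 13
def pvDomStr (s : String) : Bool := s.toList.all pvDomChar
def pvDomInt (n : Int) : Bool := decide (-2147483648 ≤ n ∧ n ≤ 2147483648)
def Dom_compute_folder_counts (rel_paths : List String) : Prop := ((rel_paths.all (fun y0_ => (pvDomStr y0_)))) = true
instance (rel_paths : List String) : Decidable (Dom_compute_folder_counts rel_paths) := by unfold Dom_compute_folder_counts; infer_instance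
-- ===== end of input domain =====

-- B collects every folder prefix by incremental concatenation in a first pass, then
-- counts them in a single second pass — a different decomposition of A's nested
-- slice-and-join counting loop; same return value.

-- ===== PORT A =====
-- rp.split("/"): the separator "/" is nonempty, so PySem.Str.split? is always `some`; exact.
def pySplitSlash (s : String) : List String :=
  (PySem.Str.split? s "/").getD []

def compute_folder_counts (rel_paths : List String) : List (String × Int) :=
  let counts0 : PySem.Dict String Int :=
    PySem.Dict.insert PySem.Dict.empty "" (rel_paths.length : Int)
  let counts := rel_paths.foldl (fun counts rp =>
    let parts := pySplitSlash rp
    (PySem.List.pyRange 1 (parts.length : Int) 1).foldl (fun counts i =>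
      PySem.Dict.insert counts (PySem.Str.join "/" (PySem.List.slice parts none (some i)))
        (PySem.Dict.getD counts (PySem.Str.join "/" (PySem.List.slice parts none (some i))) 0 + 1))
      counts) counts0
  counts.items

-- ===== PORT B =====
-- Python str '+': concatenation of code points; exact.
def pyStrAdd (a b : String) : String := String.ofList (a.toList ++ b.toList)

def compute_folder_counts_alt (rel_paths : List String) : List (String × Int) :=
  let prefixes := rel_paths.foldl (fun ps rp =>
    ((PySem.List.slice (pySplitSlash rp) none (some (-1))).foldl
      (fun (st : List String × Option String) comp =>
        let acc := match st.2 with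
          | none => comp
          | some a => pyStrAdd (pyStrAdd a "/") comp
        (st.1 ++ [acc], some acc)) (ps, (none : Option String))).1) ([] : List String)
  let counts := prefixes.foldl (fun d p => PySem.Dict.insert d p (PySem.Dict.getD d p 0 + 1))
    (PySem.Dict.insert PySem.Dict.empty "" (rel_paths.length : Int))
  counts.items

-- ===== PRECONDITION & SPEC =====
def Spec_compute_folder_counts (rel_paths : List String) (out : List (String × Int)) : Prop := out = compute_folder_counts_alt rel_paths
instance (rel_paths : List String) (out : List (String × Int)) : Decidable (Spec_compute_folder_counts rel_paths out) := by unfold Spec_compute_folder_counts; infer_instance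

-- ===== CLAIM (what is proved, stated in full; the proofs are below) =====
def Claim_equal_compute_folder_counts : Prop := ∀ (rel_paths : List String), Dom_compute_folder_counts rel_paths → Spec_compute_folder_counts rel_paths (compute_folder_counts rel_paths)

-- ===== LEMMAS AND PROOFS =====

-- the sequence of accumulated prefixes B's inner loop appends, as a recursion
def incrAux : Option String → List String → List String
  | _, [] => []
  | none, c :: cs => c :: incrAux (some c) cs
  | some a, c :: cs =>
      pyStrAdd (pyStrAdd a "/") c :: incrAux (some (pyStrAdd (pyStrAdd a "/") c)) cs

theorem bfold_eq (cs : List String) : ∀ (ps : List String) (acc : Option String),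
    (cs.foldl (fun (st : List String × Option String) comp =>
        let acc := match st.2 with
          | none => comp
          | some a => pyStrAdd (pyStrAdd a "/") comp
        (st.1 ++ [acc], some acc)) (ps, acc)).1 = ps ++ incrAux acc cs := by
  induction cs with
  | nil => intro ps acc; simp [incrAux]
  | cons c cs ih =>
      intro ps acc
      cases acc with
      | none => simp only [List.foldl_cons, ih, incrAux]; simp
      | some a => simp only [List.foldl_cons, ih, incrAux]; simp

theorem join_cons_cat (a c : String) (l : List String) :
    PySem.Str.join "/" (pyStrAdd (pyStrAdd a "/") c :: l)
      = PySem.Str.join "/" (a :: c :: l) := by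
  rw [← String.toList_inj]
  simp only [PySem.Str.toList_join, List.map_cons, pyStrAdd, String.toList_ofList]
  cases l with
  | nil => simp [PySem.Chars.join_singleton, PySem.Chars.join_cons_cons]
  | cons y ys =>
      simp [PySem.Chars.join_cons_cons]

theorem incr_some (cs : List String) : ∀ (a : String),
    incrAux (some a) cs
      = (List.range cs.length).map (fun k => PySem.Str.join "/" (a :: cs.take (k + 1))) := by
  induction cs with
  | nil => intro a; simp [incrAux]
  | cons c cs ih =>
      intro a
      simp only [incrAux, List.length_cons, List.range_succ_eq_map, List.map_cons, List.map_map]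
      congr 1
      · have h := join_cons_cat a c []
        simp at h ⊢
        rw [← String.toList_inj] at h ⊢
        simpa [PySem.Str.toList_join, PySem.Chars.join_singleton,
          PySem.Chars.join_cons_cons] using h
      · rw [ih]
        apply List.map_congr_left
        intro k _
        simp only [Function.comp, List.take_succ_cons]
        rw [join_cons_cat]

theorem incr_none (cs : List String) :
    incrAux none cs
      = (List.range cs.length).map (fun k => PySem.Str.join "/" (cs.take (k + 1))) := by
  cases cs with
  | nil => simp [incrAux]
  | cons c cs =>
      simp only [incrAux, List.length_cons, List.range_succ_eq_map, List.map_cons, List.map_map]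
      congr 1
      · rw [← String.toList_inj]
        simp [PySem.Str.toList_join, PySem.Chars.join_singleton]
      · rw [incr_some]
        apply List.map_congr_left
        intro k _
        simp only [Function.comp, List.take_succ_cons]

theorem Alist_eq (parts : List String) :
    (PySem.List.pyRange 1 (parts.length : Int) 1).map
        (fun i => PySem.Str.join "/" (PySem.List.slice parts none (some i)))
      = incrAux none parts.dropLast := by
  rw [incr_none, PySem.List.pyRange_one, List.map_map, List.length_dropLast]
  have hlen : ((parts.length : Int) - 1).toNat = parts.length - 1 := by omega
  rw [hlen]
  apply List.map_congr_left
  intro k hk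
  simp only [List.mem_range] at hk
  simp only [Function.comp]
  rw [PySem.List.slice_to parts (by omega : (0:Int) ≤ 1 + (k : Int))]
  have h1 : ((1 : Int) + (k : Int)).toNat = k + 1 := by omega
  rw [h1, List.dropLast_eq_take, List.take_take, Nat.min_eq_left (by omega)]

theorem innerA_eq (parts : List String) (d : PySem.Dict String Int) :
    (PySem.List.pyRange 1 (parts.length : Int) 1).foldl (fun counts i =>
        PySem.Dict.insert counts (PySem.Str.join "/" (PySem.List.slice parts none (some i)))
          (PySem.Dict.getD counts (PySem.Str.join "/" (PySem.List.slice parts none (some i))) 0 + 1)) d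
      = (incrAux none parts.dropLast).foldl
          (fun d p => PySem.Dict.insert d p (PySem.Dict.getD d p 0 + 1)) d := by
  rw [← Alist_eq, List.foldl_map]

-- ===== VERDICT (by name: the statement is the Claim_ definition above) =====
theorem compute_folder_counts_spec : Claim_equal_compute_folder_counts := by
  intro rel_paths _
  unfold Spec_compute_folder_counts compute_folder_counts compute_folder_counts_alt
  simp only [PySem.List.slice_to_neg_one, bfold_eq, innerA_eq,
    PySem.List.foldl_append_eq_flatMap, List.nil_append, List.foldl_flatMap]
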